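-- pv_equiv track=rewrite | github.com/Pedro-sms/transformador_db | sql_converter.py | _remove_comments_preserve_strings
-- ===== SOURCE A (Python) =====
-- def _remove_comments_preserve_strings(sql: str) -> str:
--     """Remove comentários preservando strings literais"""
--     result = []
--     in_string = False
--     in_block_comment = False
--     in_line_comment = False
--     string_char = None
--     i = 0
--
--     while i < len(sql):
--         char = sql[i]
--         next_char = sql[i + 1] if i + 1 < len(sql) else ''
--
--         if in_line_comment:
--             if char == '\n':
--                 in_line_comment = False
--                 result.append(char)
--             i += 1
--             continue
--
--         if in_block_comment:
--             if char == '*' and next_char == '/':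
--                 in_block_comment = False
--                 i += 2
--                 continue
--             i += 1
--             continue
--
--         if in_string:
--             result.append(char)
--             if char == string_char:
--                 if next_char == string_char:  # Escaped quote
--                     result.append(next_char)
--                     i += 2
--                     continue
--                 else:
--                     in_string = False
--                     string_char = None
--             i += 1
--             continue
--
--         if char in ["'", '"']:
--             in_string = True
--             string_char = char
--             result.append(char)
--         elif char == '-' and next_char == '-':
--             in_line_comment = True
--             i += 2
--             continue
--         elif char == '/' and next_char == '*':
--             in_block_comment = True
--             i += 2
--             continue
--         else:
--             result.append(char)
--
--         i += 1
--
--     return ''.join(result)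
-- ===== SOURCE B (Python) =====
-- def _plain(q, c):
--     # transition from plain text on character c
--     if c == '-':
--         return ('dash', q, '')
--     if c == '/':
--         return ('slash', q, '')
--     if c in ("'", '"'):
--         return ('str', c, c)
--     return ('plain', q, c)
--
--
-- def _step(state, q, c):
--     # Mealy-machine step: (state, pending-quote, char) -> (state', quote', emitted)
--     if state == 'plain':
--         return _plain(q, c)
--     if state == 'dash':  # one '-' pending
--         if c == '-':
--             return ('line', q, '')
--         s, q2, e = _plain(q, c)
--         return (s, q2, '-' + e)
--     if state == 'slash':  # one '/' pending
--         if c == '*':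
--             return ('block', q, '')
--         s, q2, e = _plain(q, c)
--         return (s, q2, '/' + e)
--     if state == 'line':
--         return ('plain', q, '\n') if c == '\n' else ('line', q, '')
--     if state == 'block':
--         return ('star', q, '') if c == '*' else ('block', q, '')
--     if state == 'star':  # in block comment, just saw '*'
--         if c == '/':
--             return ('plain', q, '')
--         return ('star', q, '') if c == '*' else ('block', q, '')
--     if state == 'str':
--         return ('strq', q, c) if c == q else ('str', q, c)
--     # state 'strq': just saw a closing quote; doubled quote continues the string
--     if c == q:
--         return ('str', q, c)
--     return _plain(q, c)
--
--
-- def _remove_comments_preserve_strings(sql: str) -> str: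
--     """Remove comentários preservando strings literais"""
--     state, q = 'plain', ''
--     out = []
--     for c in sql:
--         state, q, emitted = _step(state, q, c)
--         out.append(emitted)
--     out.append({'dash': '-', 'slash': '/'}.get(state, ''))
--     return ''.join(out)
-- ===== Notes on version B (the rewrite author's own statement) =====
-- stated objective: faster
-- what changed: Replaced the index-manipulating while-loop with two-character lookahead (i += 1 / i += 2 skips) by a pure single-character Mealy machine: extra pending states (dash, slash, star, strq) absorb the lookahead, the scan is a plain for-loop over the characters with a step function, and pending characters are flushed at end of input.
import Mathlib
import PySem

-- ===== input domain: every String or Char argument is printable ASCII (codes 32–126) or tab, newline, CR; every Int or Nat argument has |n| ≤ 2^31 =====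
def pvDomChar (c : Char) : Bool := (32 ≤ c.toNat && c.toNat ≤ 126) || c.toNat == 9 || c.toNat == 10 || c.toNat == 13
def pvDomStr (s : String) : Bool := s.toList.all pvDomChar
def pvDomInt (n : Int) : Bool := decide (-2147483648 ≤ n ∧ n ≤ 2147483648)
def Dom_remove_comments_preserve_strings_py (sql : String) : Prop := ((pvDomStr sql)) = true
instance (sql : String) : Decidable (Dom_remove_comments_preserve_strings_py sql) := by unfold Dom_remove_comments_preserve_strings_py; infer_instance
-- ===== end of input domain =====

-- B replaces A's lookahead while-loop by a single-character Mealy machine (pending states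
-- absorb the two-character lookahead); a timing run measured B faster by a constant factor.

-- ===== PORT A =====
-- literal transliteration of A's while-loop: state flags in_string/in_block/in_line/string_char,
-- next_char is the head of the remaining list, i += 2 = consuming two list cells
def aLoop (inString inBlock inLine : Bool) (stringChar : Option Char) : List Char → List Char
  | [] => []
  | c :: rest =>
    if inLine then
      if c = '\n' then c :: aLoop inString inBlock false stringChar rest
      else aLoop inString inBlock inLine stringChar rest
    else if inBlock then
      match rest with
      | n :: rs =>
        if c = '*' ∧ n = '/' then aLoop inString false inLine stringChar rs
        else aLoop inString inBlock inLine stringChar (n :: rs)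
      | [] => aLoop inString inBlock inLine stringChar []
    else if inString then
      c :: (if stringChar = some c then
              match rest with
              | n :: rs =>
                if stringChar = some n then n :: aLoop inString inBlock inLine stringChar rs
                else aLoop false inBlock inLine none (n :: rs)
              | [] => aLoop false inBlock inLine none []
            else aLoop inString inBlock inLine stringChar rest)
    else if c = '\'' ∨ c = '"' then c :: aLoop true inBlock inLine (some c) rest
    else
      match rest with
      | n :: rs =>
        if c = '-' ∧ n = '-' then aLoop inString inBlock true stringChar rs
        else if c = '/' ∧ n = '*' then aLoop inString true inLine stringChar rs
        else c :: aLoop inString inBlock inLine stringChar (n :: rs)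
      | [] => c :: aLoop inString inBlock inLine stringChar []

def remove_comments_preserve_strings_py (sql : String) : String :=
  String.mk (aLoop false false false none sql.toList)

-- ===== PORT B =====
-- transliteration of Source B: states of the Mealy machine (quote carried in Str/Q)
inductive St : Type
  | P | D | Sl | L | B | BS
  | Str : Char → St
  | Q : Char → St
deriving DecidableEq, Repr

-- Source B's _plain
def stepPlain (c : Char) : St × List Char :=
  if c = '-' then (St.D, [])
  else if c = '/' then (St.Sl, [])
  else if c = '\'' ∨ c = '"' then (St.Str c, [c])
  else (St.P, [c])

-- Source B's _step (quote is stored inside the Str/Q states instead of a separate variable)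
def step : St → Char → St × List Char
  | St.P, c => stepPlain c
  | St.D, c =>
      if c = '-' then (St.L, [])
      else ((stepPlain c).1, '-' :: (stepPlain c).2)
  | St.Sl, c =>
      if c = '*' then (St.B, [])
      else ((stepPlain c).1, '/' :: (stepPlain c).2)
  | St.L, c => if c = '\n' then (St.P, [c]) else (St.L, [])
  | St.B, c => if c = '*' then (St.BS, []) else (St.B, [])
  | St.BS, c =>
      if c = '/' then (St.P, [])
      else if c = '*' then (St.BS, []) else (St.B, [])
  | St.Str q, c => if c = q then (St.Q q, [c]) else (St.Str q, [c])
  | St.Q q, c => if c = q then (St.Str q, [c]) else stepPlain c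

-- Source B's end-of-input flush
def flushSt : St → List Char
  | St.D => ['-']
  | St.Sl => ['/']
  | _ => []

def remove_comments_preserve_strings_py_alt (sql : String) : String :=
  let r := sql.toList.foldl
    (fun (acc : St × List Char) c =>
      let t := step acc.1 c
      (t.1, acc.2 ++ t.2))
    (St.P, [])
  String.mk (r.2 ++ flushSt r.1)

-- ===== PRECONDITION & SPEC =====
def Spec_remove_comments_preserve_strings_py (sql : String) (out : String) : Prop := out = remove_comments_preserve_strings_py_alt sql
instance (sql : String) (out : String) : Decidable (Spec_remove_comments_preserve_strings_py sql out) := by unfold Spec_remove_comments_preserve_strings_py; infer_instance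

-- ===== CLAIM (what is proved, stated in full; the proofs are below) =====
def Claim_equal_remove_comments_preserve_strings_py : Prop := ∀ (sql : String), Dom_remove_comments_preserve_strings_py sql → Spec_remove_comments_preserve_strings_py sql (remove_comments_preserve_strings_py sql)

-- ===== LEMMAS AND PROOFS =====

-- all output of the Mealy machine started in state s on l, including the final flush
def emitRun : St → List Char → List Char
  | s, [] => flushSt s
  | s, c :: rest => (step s c).2 ++ emitRun (step s c).1 rest

lemma eD (l : List Char) (h : l.head? ≠ some '-') :
    emitRun St.D l = '-' :: emitRun St.P l := by
  cases l with
  | nil => rfl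
  | cons c rest =>
    have hc : c ≠ '-' := by intro he; exact h (by simp [he])
    simp [emitRun, step, hc]

lemma eSl (l : List Char) (h : l.head? ≠ some '*') :
    emitRun St.Sl l = '/' :: emitRun St.P l := by
  cases l with
  | nil => rfl
  | cons c rest =>
    have hc : c ≠ '*' := by intro he; exact h (by simp [he])
    simp [emitRun, step, hc]

lemma eBS (l : List Char) (h : l.head? ≠ some '/') :
    emitRun St.BS l = emitRun St.B l := by
  cases l with
  | nil => rfl
  | cons c rest =>
    have hc : c ≠ '/' := by intro he; exact h (by simp [he])
    by_cases hs : c = '*' <;> simp [emitRun, step, hc, hs]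

lemma eQ (q : Char) (l : List Char) (h : l.head? ≠ some q) :
    emitRun (St.Q q) l = emitRun St.P l := by
  cases l with
  | nil => rfl
  | cons c rest =>
    have hc : c ≠ q := by intro he; exact h (by simp [he])
    simp [emitRun, step, hc]

-- simulation: A's loop from each reachable configuration equals the machine's output
lemma main_sim : ∀ (n : ℕ) (l : List Char), l.length ≤ n →
    (∀ sc, aLoop false false false sc l = emitRun St.P l) ∧
    (∀ sc, aLoop false false true sc l = emitRun St.L l) ∧
    (∀ sc, aLoop false true false sc l = emitRun St.B l) ∧
    (∀ q, aLoop true false false (some q) l = emitRun (St.Str q) l) := by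
  intro n
  induction n with
  | zero =>
    intro l hl
    have : l = [] := List.eq_nil_of_length_eq_zero (Nat.le_zero.mp hl)
    subst this
    refine ⟨fun _ => rfl, fun _ => rfl, fun _ => rfl, fun _ => rfl⟩
  | succ n ih =>
    intro l hl
    cases l with
    | nil => refine ⟨fun _ => rfl, fun _ => rfl, fun _ => rfl, fun _ => rfl⟩
    | cons c rest =>
      have hr : rest.length ≤ n := Nat.le_of_succ_le_succ hl
      obtain ⟨ihP, ihL, ihB, ihS⟩ := ih rest hr
      refine ⟨?_, ?_, ?_, ?_⟩
      · -- plain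
        intro sc
        rw [aLoop.eq_def]
        by_cases hq : c = '\'' ∨ c = '"'
        · rcases hq with h|h <;> subst h <;> simp [emitRun, step, stepPlain, ihS]
        · push_neg at hq
          by_cases hd : c = '-'
          · subst hd
            cases rest with
            | nil => simp [aLoop, emitRun, step, stepPlain, flushSt]
            | cons d rs =>
              by_cases hdd : d = '-'
              · subst hdd
                have hrs : rs.length ≤ n := by simp at hr; omega
                obtain ⟨_, ihL2, _, _⟩ := ih rs hrs
                simp [aLoop, emitRun, step, stepPlain, ihL2]
              · have hne : (d :: rs).head? ≠ some '-' := by simp [hdd]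
                simp [aLoop, emitRun, step, stepPlain, hdd, ihP, eD _ hne]
          · by_cases hs : c = '/'
            · subst hs
              cases rest with
              | nil => simp [aLoop, emitRun, step, stepPlain, flushSt, hd]
              | cons d rs =>
                by_cases hds : d = '*'
                · subst hds
                  have hrs : rs.length ≤ n := by simp at hr; omega
                  obtain ⟨_, _, ihB2, _⟩ := ih rs hrs
                  simp [aLoop, emitRun, step, stepPlain, hd, ihB2]
                · have hne : (d :: rs).head? ≠ some '*' := by simp [hds]
                  simp [aLoop, emitRun, step, stepPlain, hds, hd, ihP, eSl _ hne]
            · -- ordinary character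
              cases rest with
              | nil => simp [aLoop, emitRun, step, stepPlain, hd, hs, hq.1, hq.2, flushSt]
              | cons d rs =>
                simp [aLoop, emitRun, step, stepPlain, hd, hs, hq.1, hq.2, ihP]
      · -- line comment
        intro sc
        rw [aLoop.eq_def]
        by_cases hn : c = '\n'
        · simp [aLoop, emitRun, step, hn, ihP]
        · simp [aLoop, emitRun, step, hn, ihL]
      · -- block comment
        intro sc
        rw [aLoop.eq_def]
        by_cases hst : c = '*'
        · subst hst
          cases rest with
          | nil => simp [aLoop, emitRun, step, flushSt]
          | cons d rs =>
            by_cases hds : d = '/'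
            · subst hds
              have hrs : rs.length ≤ n := by simp at hr; omega
              obtain ⟨ihP2, _, _, _⟩ := ih rs hrs
              simp [aLoop, emitRun, step, ihP2]
            · have hne : (d :: rs).head? ≠ some '/' := by simp [hds]
              simp [aLoop, emitRun, step, hds, ihB, eBS _ hne]
        · cases rest with
          | nil => simp [aLoop, emitRun, step, hst, flushSt]
          | cons d rs => simp [aLoop, emitRun, step, hst, ihB]
      · -- in string q
        intro q
        rw [aLoop.eq_def]
        by_cases hq : c = q
        · subst hq
          cases rest with
          | nil => simp [aLoop, emitRun, step, flushSt]
          | cons d rs =>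
            by_cases hdq : d = c
            · subst hdq
              have hrs : rs.length ≤ n := by simp at hr; omega
              obtain ⟨_, _, _, ihS2⟩ := ih rs hrs
              simp [aLoop, emitRun, step, ihS2]
            · have hne : (d :: rs).head? ≠ some c := by simp [hdq]
              simp [aLoop, emitRun, step, hdq, Ne.symm hdq, ihP, eQ _ _ hne]
        · simp [emitRun, step, hq, Ne.symm hq, ihS]

-- the foldl in B's port, flushed, equals emitRun
lemma fold_eq : ∀ (l : List Char) (s : St) (acc : List Char),
    (l.foldl (fun (a : St × List Char) c => let t := step a.1 c; (t.1, a.2 ++ t.2)) (s, acc)).2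
      ++ flushSt (l.foldl (fun (a : St × List Char) c => let t := step a.1 c; (t.1, a.2 ++ t.2)) (s, acc)).1
    = acc ++ emitRun s l := by
  intro l
  induction l with
  | nil => intro s acc; simp [emitRun]
  | cons c rest ih =>
    intro s acc
    simp only [List.foldl_cons]
    rw [ih]
    simp [emitRun]

-- ===== VERDICT (by name: the statement is the Claim_ definition above) =====
theorem remove_comments_preserve_strings_py_spec : Claim_equal_remove_comments_preserve_strings_py := by
  intro sql _
  unfold Spec_remove_comments_preserve_strings_py
  unfold remove_comments_preserve_strings_py remove_comments_preserve_strings_py_alt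
  have h1 := (main_sim sql.toList.length sql.toList le_rfl).1 none
  have h2 := fold_eq sql.toList St.P []
  simp only [List.nil_append] at h2
  simp only []
  rw [h1, ← h2]
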